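-- pv_equiv track=rewrite | github.com/DevStarSJ/algorithmExercise | TopCoder/06.FriendScore.py | highestScores
-- ===== SOURCE A (Python) =====
-- def highestScores(friends):
--     num = len(friends)
--     first_step = [set() for _ in range(num)]
--     for i, line in enumerate(friends):
--         for j, v in enumerate(line):
--             if v == 'Y':
--                 first_step[i].add(j)
--
--     best_score = 0
--     second_step = [set() for _ in range(num)]
--     for i, single in enumerate(first_step):
--         second_step[i].update(list(single))
--         for friend in single:
--             second_step[i].update(list(first_step[friend]))
--         if (i in list(second_step[i])):
--             second_step[i].remove(i)
--         score = len(second_step[i])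
--
--         if score > best_score:
--             best_score = score
--
--     return best_score
-- ===== SOURCE B (Python) =====
-- def highestScores(friends):
--     n = len(friends)
--     best = 0
--     for i in range(n):
--         row = friends[i]
--         score = 0
--         for j in range(n):
--             if j == i:
--                 continue
--             if (j < len(row) and row[j] == 'Y') or any(
--                 c == 'Y' and j < len(friends[k]) and friends[k][j] == 'Y'
--                 for k, c in enumerate(row)
--             ):
--                 score += 1
--         best = max(best, score)
--     return best
-- ===== Notes on version B (the rewrite author's own statement) =====
-- stated objective: alternative
-- what changed: B never builds A's first_step/second_step sets: it counts, for each ordered pair (i,j) with j != i, whether j is a direct friend or a short-circuiting any() finds a middle person k, so the per-person state is a plain counter instead of union sets.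
import Mathlib
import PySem

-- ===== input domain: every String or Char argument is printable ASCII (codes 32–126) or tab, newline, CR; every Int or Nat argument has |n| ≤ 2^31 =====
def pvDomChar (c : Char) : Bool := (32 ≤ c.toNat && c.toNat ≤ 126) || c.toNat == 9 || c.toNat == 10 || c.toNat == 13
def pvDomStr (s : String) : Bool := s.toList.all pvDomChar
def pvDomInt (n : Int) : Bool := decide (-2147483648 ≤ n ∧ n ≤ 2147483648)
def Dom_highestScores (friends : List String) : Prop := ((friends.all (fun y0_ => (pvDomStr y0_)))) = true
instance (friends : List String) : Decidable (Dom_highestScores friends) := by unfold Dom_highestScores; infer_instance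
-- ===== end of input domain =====

-- B replaces A's staged set-building (first_step sets, second_step unions, remove self, len) by a
-- per-pair count: for each ordered pair (i, j), j ≠ i, test directly whether j is a direct friend or
-- some middle person exists; no sets are built. Objective: alternative (same cost, no intermediate state).

-- ===== PORT A =====
-- set of column indices j with line[j] == 'Y'  (A's first_step row loop)
def pvRowSet (line : String) : PySem.Set Int :=
  (PySem.List.enumerate line.toList).foldl
    (fun s p => if p.2 = 'Y' then PySem.Set.add s p.1 else s)
    PySem.Set.empty

-- A's per-i body: build second_step[i], remove i if present, take its size.
-- first_step[friend] raises IndexError in Python when friend ≥ len(friends); those inputs are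
-- outside Pre_, so the pyGetD default is never reached on admitted inputs.
def pvSecondLen (fs : List (PySem.Set Int)) (i : Int) (single : PySem.Set Int) : Int :=
  let s2 := single.foldl
      (fun s f => PySem.Set.update s (PySem.List.pyGetD fs f PySem.Set.empty))
      (PySem.Set.update PySem.Set.empty single)
  let s3 := if i ∈ s2 then PySem.Set.discard s2 i else s2
  PySem.Set.len s3

def highestScores (friends : List String) : Int :=
  let first_step := friends.map pvRowSet
  (PySem.List.enumerate first_step).foldl
    (fun best p =>
      let score := pvSecondLen first_step p.1 p.2
      if score > best then score else best)
    0

-- ===== PORT B =====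
-- B's 'j < len(row) and row[j] == "Y"'; j comes from range(n) so j ≥ 0 and the pyGetD default
-- is never reached when the guard holds.
def pvDirect (row : String) (j : Int) : Bool :=
  decide (j < (row.toList.length : Int)) && (PySem.List.pyGetD row.toList j ' ' == 'Y')

-- B's 'any(c == "Y" and j < len(friends[k]) and friends[k][j] == "Y" for k, c in enumerate(row))'.
-- friends[k] raises IndexError in Python when k ≥ len(friends) (same as A); those inputs are
-- outside Pre_, so the pyGetD default "" is never reached on admitted inputs.
def pvTwoStep (friends : List String) (row : String) (j : Int) : Bool :=
  (PySem.List.enumerate row.toList).any fun p =>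
    p.2 == 'Y' && pvDirect (PySem.List.pyGetD friends p.1 "") j

def highestScores_alt (friends : List String) : Int :=
  (PySem.List.pyRange 0 (friends.length : Int) 1).foldl
    (fun best i =>
      let row := PySem.List.pyGetD friends i ""
      let score := (PySem.List.pyRange 0 (friends.length : Int) 1).foldl
        (fun sc j =>
          if j = i then sc
          else if pvDirect row j || pvTwoStep friends row j then sc + 1 else sc)
        0
      max best score)
    0

-- ===== PRECONDITION & SPEC =====
-- Pre_ excludes exactly the inputs where A raises IndexError: a 'Y' in some row at a column ≥ len(friends).
def Pre_highestScores (friends : List String) : Prop :=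
  ∀ line ∈ friends, ∀ p ∈ PySem.List.enumerate line.toList, p.2 = 'Y' → p.1 < (friends.length : Int)
instance (friends : List String) : Decidable (Pre_highestScores friends) := by
  unfold Pre_highestScores; infer_instance

def pvWitness_highestScores : List String := ["NY", "YN"]

def Spec_highestScores (friends : List String) (out : Int) : Prop := out = highestScores_alt friends
instance (friends : List String) (out : Int) : Decidable (Spec_highestScores friends out) := by
  unfold Spec_highestScores; infer_instance

-- ===== CLAIM (what is proved, stated in full; the proofs are below) =====
def Claim_equal_highestScores : Prop := ∀ (friends : List String), Dom_highestScores friends → Pre_highestScores friends → Spec_highestScores friends (highestScores friends)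

-- ===== LEMMAS AND PROOFS =====

-- membership of A's row-building fold
lemma pv_mem_foldl_addY (l : List (Int × Char)) (s0 : List Int) (x : Int) :
    (x ∈ l.foldl (fun s p => if p.2 = 'Y' then PySem.Set.add s p.1 else s) s0) ↔
      x ∈ s0 ∨ ∃ p ∈ l, p.2 = 'Y' ∧ x = p.1 := by
  induction l generalizing s0 with
  | nil => simp
  | cons a t ih =>
    simp only [List.foldl_cons]
    by_cases h : a.2 = 'Y'
    · simp only [if_pos h, ih, PySem.Set.mem_add, List.mem_cons]
      constructor
      · rintro ((hs | rfl) | ⟨p, hp, hy, rfl⟩)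
        · exact Or.inl hs
        · exact Or.inr ⟨a, Or.inl rfl, h, rfl⟩
        · exact Or.inr ⟨p, Or.inr hp, hy, rfl⟩
      · rintro (hs | ⟨p, (rfl | hp), hy, rfl⟩)
        · exact Or.inl (Or.inl hs)
        · exact Or.inl (Or.inr rfl)
        · exact Or.inr ⟨p, hp, hy, rfl⟩
    · simp only [if_neg h, ih, List.mem_cons]
      constructor
      · rintro (hs | ⟨p, hp, hy, rfl⟩)
        · exact Or.inl hs
        · exact Or.inr ⟨p, Or.inr hp, hy, rfl⟩
      · rintro (hs | ⟨p, (rfl | hp), hy, rfl⟩)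
        · exact Or.inl hs
        · exact absurd hy h
        · exact Or.inr ⟨p, hp, hy, rfl⟩

-- membership / nodup of A's second_step-building fold
lemma pv_mem_foldl_update (l : List Int) (g : Int → List Int) (s0 : List Int) (x : Int) :
    (x ∈ l.foldl (fun s f => PySem.Set.update s (g f)) s0) ↔ x ∈ s0 ∨ ∃ f ∈ l, x ∈ g f := by
  induction l generalizing s0 with
  | nil => simp
  | cons a t ih =>
    simp only [List.foldl_cons, ih, PySem.Set.mem_update, List.mem_cons]
    constructor
    · rintro ((hs | hg) | ⟨f, hf, hx⟩)
      · exact Or.inl hs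
      · exact Or.inr ⟨a, Or.inl rfl, hg⟩
      · exact Or.inr ⟨f, Or.inr hf, hx⟩
    · rintro (hs | ⟨f, (rfl | hf), hx⟩)
      · exact Or.inl (Or.inl hs)
      · exact Or.inl (Or.inr hx)
      · exact Or.inr ⟨f, hf, hx⟩

lemma pv_nodup_foldl_update (l : List Int) (g : Int → List Int) (s0 : List Int) (h : s0.Nodup) :
    (l.foldl (fun s f => PySem.Set.update s (g f)) s0).Nodup := by
  induction l generalizing s0 with
  | nil => exact h
  | cons a t ih => exact ih _ (PySem.Set.nodup_update _ _ h)

lemma pv_mem_rowSet (line : String) (x : Int) :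
    x ∈ pvRowSet line ↔
      ∃ k : Nat, ∃ _ : k < line.toList.length, line.toList[k] = 'Y' ∧ x = (k : Int) := by
  unfold pvRowSet
  rw [pv_mem_foldl_addY]
  constructor
  · rintro (hs | ⟨p, hp, hy, rfl⟩)
    · simp [PySem.Set.empty] at hs
    · rw [PySem.List.mem_enumerate_iff] at hp
      obtain ⟨k, hk, rfl⟩ := hp
      exact ⟨k, hk, hy, by simp⟩
  · rintro ⟨k, hk, hy, rfl⟩
    refine Or.inr ⟨((k : Int), line.toList[k]), ?_, hy, rfl⟩
    rw [PySem.List.mem_enumerate_iff]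
    exact ⟨k, hk, by simp⟩

lemma pv_rowSet_nonneg (line : String) (x : Int) (h : x ∈ pvRowSet line) : 0 ≤ x := by
  rw [pv_mem_rowSet] at h
  obtain ⟨k, _, _, rfl⟩ := h
  exact Int.natCast_nonneg k

-- under Pre_, every member of a row set is < len(friends)
lemma pv_rowSet_lt (friends : List String) (hpre : Pre_highestScores friends)
    (line : String) (hline : line ∈ friends) (x : Int) (h : x ∈ pvRowSet line) :
    x < (friends.length : Int) := by
  rw [pv_mem_rowSet] at h
  obtain ⟨k, hk, hy, rfl⟩ := h
  refine hpre line hline ((k : Int), line.toList[k]) ?_ hy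
  rw [PySem.List.mem_enumerate_iff]
  exact ⟨k, hk, by simp⟩

-- nodup lists counted by a predicate over range n
lemma pv_length_eq_countP (l : List Int) (hn : l.Nodup) (p : Int → Bool) (n : Nat)
    (h : ∀ x, x ∈ l ↔ ∃ m : Nat, m < n ∧ x = (m : Int) ∧ p (m : Int) = true) :
    l.length = (List.range n).countP (fun m : Nat => p (m : Int)) := by
  have hperm : l.Perm (((List.range n).filter (fun m : Nat => p (m : Int))).map (fun m : Nat => (m : Int))) := by
    rw [List.perm_ext_iff_of_nodup hn
      (((List.nodup_range).filter _).map (fun a b hab => by exact_mod_cast hab))]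
    intro a
    rw [h]
    simp only [List.mem_map, List.mem_filter, List.mem_range]
    constructor
    · rintro ⟨m, hm, rfl, hp⟩; exact ⟨m, ⟨hm, hp⟩, rfl⟩
    · rintro ⟨m, ⟨hm, hp⟩, rfl⟩; exact ⟨m, hm, rfl, hp⟩
  rw [hperm.length_eq, List.length_map, ← List.countP_eq_length_filter]

-- running max with an if is foldl max
lemma pv_foldl_if_max {α : Type} (f : α → Int) (l : List α) (b : Int) :
    l.foldl (fun best p => if f p > best then f p else best) b = (l.map f).foldl max b := by
  induction l generalizing b with
  | nil => rfl
  | cons a t ih =>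
    simp only [List.foldl_cons, List.map_cons, ih]
    congr 1
    rcases Int.lt_or_le b (f a) with h | h
    · rw [if_pos h, max_eq_right h.le]
    · rw [if_neg (not_lt.mpr h), max_eq_left h]

-- B's inner skip-and-count loop is a countP over the range
lemma pv_foldl_skip_count (l : List Int) (i : Int) (q : Int → Bool) (a : Int) :
    l.foldl (fun sc j => if j = i then sc else if q j then sc + 1 else sc) a =
      a + (l.countP (fun j => !(j == i) && q j) : Int) := by
  induction l generalizing a with
  | nil => simp
  | cons x t ih =>
    simp only [List.foldl_cons, List.countP_cons]
    by_cases hx : x = i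
    · rw [if_pos hx, ih]
      simp [hx]
    · rw [if_neg hx]
      by_cases hq : q x = true
      · rw [if_pos hq, ih]
        have hb : (!(x == i) && q x) = true := by simp [hx, hq]
        rw [hb, if_pos rfl]
        push_cast
        ring
      · rw [if_neg hq, ih]
        simp [hq]

-- pvDirect at a Nat index is membership in the row set
lemma pv_direct_iff (row : String) (m : Nat) :
    pvDirect row (m : Int) = true ↔ (m : Int) ∈ pvRowSet row := by
  unfold pvDirect
  rw [pv_mem_rowSet, PySem.List.pyGetD_natCast]
  simp only [Bool.and_eq_true, decide_eq_true_eq, beq_iff_eq]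
  constructor
  · rintro ⟨hlt, hget⟩
    have hm : m < row.toList.length := by exact_mod_cast hlt
    rw [List.getD_eq_getElem _ _ hm] at hget
    exact ⟨m, hm, hget, rfl⟩
  · rintro ⟨k, hk, hy, hkm⟩
    have : m = k := by exact_mod_cast hkm
    subst this
    exact ⟨by exact_mod_cast hk, by rw [List.getD_eq_getElem _ _ hk]; exact hy⟩

-- pvTwoStep at a Nat index: a middle person in row's set whose (pyGetD-)row contains m
lemma pv_twoStep_iff (friends : List String) (row : String) (m : Nat) :
    pvTwoStep friends row (m : Int) = true ↔
      ∃ f ∈ pvRowSet row, (m : Int) ∈ pvRowSet (PySem.List.pyGetD friends f "") := by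
  unfold pvTwoStep
  rw [List.any_eq_true]
  constructor
  · rintro ⟨p, hp, hcond⟩
    rw [Bool.and_eq_true, beq_iff_eq] at hcond
    obtain ⟨hy, hdir⟩ := hcond
    have hf : p.1 ∈ pvRowSet row := by
      rw [PySem.List.mem_enumerate_iff] at hp
      obtain ⟨k, hk, rfl⟩ := hp
      exact (pv_mem_rowSet _ _).mpr ⟨k, hk, hy, by simp⟩
    exact ⟨p.1, hf, (pv_direct_iff _ m).mp hdir⟩
  · rintro ⟨f, hf, hmem⟩
    obtain ⟨k, hk, hy, rfl⟩ := (pv_mem_rowSet _ _).mp hf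
    refine ⟨((k : Int), row.toList[k]), ?_, ?_⟩
    · rw [PySem.List.mem_enumerate_iff]; exact ⟨k, hk, by simp⟩
    · rw [Bool.and_eq_true, beq_iff_eq]
      exact ⟨hy, (pv_direct_iff _ m).mpr hmem⟩

-- the central per-index lemma: A's second_step size = B's pair count at i = k
lemma pv_score_eq (friends : List String) (hpre : Pre_highestScores friends)
    (k : Nat) (hk : k < friends.length) :
    pvSecondLen (friends.map pvRowSet) (k : Int) (pvRowSet friends[k]) =
      ((List.range friends.length).countP
        (fun m : Nat => !((m : Int) == (k : Int)) &&
          (pvDirect friends[k] (m : Int) || pvTwoStep friends friends[k] (m : Int))) : Int) := by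
  have hline : friends[k] ∈ friends := List.getElem_mem hk
  -- resolving A's indexing first_step[f]
  have hfs : ∀ (m : Nat) (hm : m < friends.length),
      PySem.List.pyGetD (friends.map pvRowSet) (m : Int) PySem.Set.empty = pvRowSet friends[m] := by
    intro m hm
    rw [PySem.List.pyGetD_natCast, List.getD_eq_getElem _ _ (by simpa using hm), List.getElem_map]
  -- resolving B's indexing friends[f]
  have hfr : ∀ (m : Nat) (hm : m < friends.length),
      PySem.List.pyGetD friends (m : Int) "" = friends[m] := by
    intro m hm
    rw [PySem.List.pyGetD_natCast, List.getD_eq_getElem _ _ hm]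
  -- A's second_step set before the self-removal
  have hnd2 : (pvRowSet friends[k]).foldl
      (fun s f => PySem.Set.update s (PySem.List.pyGetD (friends.map pvRowSet) f PySem.Set.empty))
      (PySem.Set.update PySem.Set.empty (pvRowSet friends[k])) |>.Nodup :=
    pv_nodup_foldl_update _ _ _ (PySem.Set.nodup_update _ _ (by simp [PySem.Set.empty]))
  have hmem2 : ∀ x, (x ∈ (pvRowSet friends[k]).foldl
      (fun s f => PySem.Set.update s (PySem.List.pyGetD (friends.map pvRowSet) f PySem.Set.empty))
      (PySem.Set.update PySem.Set.empty (pvRowSet friends[k]))) ↔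
        x ∈ pvRowSet friends[k] ∨
          ∃ f ∈ pvRowSet friends[k],
            x ∈ PySem.List.pyGetD (friends.map pvRowSet) f PySem.Set.empty := by
    intro x
    rw [pv_mem_foldl_update _ (fun f => PySem.List.pyGetD (friends.map pvRowSet) f PySem.Set.empty)]
    rw [PySem.Set.mem_update]
    simp [PySem.Set.empty]
  set s2 := (pvRowSet friends[k]).foldl
      (fun s f => PySem.Set.update s (PySem.List.pyGetD (friends.map pvRowSet) f PySem.Set.empty))
      (PySem.Set.update PySem.Set.empty (pvRowSet friends[k])) with hs2
  -- the set after the self-removal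
  have hnd3 : (if (k : Int) ∈ s2 then PySem.Set.discard s2 (k : Int) else s2).Nodup := by
    by_cases hin : (k : Int) ∈ s2
    · rw [if_pos hin]; exact PySem.Set.nodup_discard _ _ hnd2
    · rwa [if_neg hin]
  have hmem3 : ∀ x, (x ∈ if (k : Int) ∈ s2 then PySem.Set.discard s2 (k : Int) else s2) ↔
      x ∈ s2 ∧ x ≠ (k : Int) := by
    intro x
    by_cases hin : (k : Int) ∈ s2
    · rw [if_pos hin, PySem.Set.mem_discard]
    · rw [if_neg hin]
      exact ⟨fun hx => ⟨hx, fun hEq => hin (hEq ▸ hx)⟩, fun h => h.1⟩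
  -- characterize membership in the final set by B's per-pair predicate
  have hchar : ∀ x, (x ∈ if (k : Int) ∈ s2 then PySem.Set.discard s2 (k : Int) else s2) ↔
      ∃ m : Nat, m < friends.length ∧ x = (m : Int) ∧
        (!((m : Int) == (k : Int)) &&
          (pvDirect friends[k] (m : Int) || pvTwoStep friends friends[k] (m : Int))) = true := by
    intro x
    rw [hmem3, hmem2]
    constructor
    · rintro ⟨hx2, hne⟩
      have hbounds : 0 ≤ x ∧ x < (friends.length : Int) := by
        rcases hx2 with hR | ⟨f, hf, hx⟩
        · exact ⟨pv_rowSet_nonneg _ _ hR, pv_rowSet_lt friends hpre _ hline x hR⟩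
        · obtain ⟨m2, rfl⟩ := Int.eq_ofNat_of_zero_le (pv_rowSet_nonneg _ _ hf)
          have hm2 : m2 < friends.length := by
            exact_mod_cast pv_rowSet_lt friends hpre _ hline _ hf
          rw [hfs m2 hm2] at hx
          exact ⟨pv_rowSet_nonneg _ _ hx,
            pv_rowSet_lt friends hpre _ (List.getElem_mem hm2) x hx⟩
      obtain ⟨m, rfl⟩ := Int.eq_ofNat_of_zero_le hbounds.1
      have hmn : m < friends.length := by exact_mod_cast hbounds.2
      refine ⟨m, hmn, rfl, ?_⟩
      rw [Bool.and_eq_true, Bool.or_eq_true]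
      refine ⟨by simp [hne], ?_⟩
      rcases hx2 with hR | ⟨f, hf, hx⟩
      · exact Or.inl ((pv_direct_iff _ m).mpr hR)
      · refine Or.inr ((pv_twoStep_iff friends _ m).mpr ⟨f, hf, ?_⟩)
        obtain ⟨m2, rfl⟩ := Int.eq_ofNat_of_zero_le (pv_rowSet_nonneg _ _ hf)
        have hm2 : m2 < friends.length := by
          exact_mod_cast pv_rowSet_lt friends hpre _ hline _ hf
        rw [hfs m2 hm2] at hx
        rwa [hfr m2 hm2]
    · rintro ⟨m, hmn, rfl, hp⟩
      rw [Bool.and_eq_true, Bool.or_eq_true] at hp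
      obtain ⟨hneq, hcond⟩ := hp
      have hne : ((m : Nat) : Int) ≠ (k : Int) := by simpa using hneq
      refine ⟨?_, hne⟩
      rcases hcond with hd | ht
      · exact Or.inl ((pv_direct_iff _ m).mp hd)
      · obtain ⟨f, hf, hmem⟩ := (pv_twoStep_iff friends _ m).mp ht
        obtain ⟨m2, rfl⟩ := Int.eq_ofNat_of_zero_le (pv_rowSet_nonneg _ _ hf)
        have hm2 : m2 < friends.length := by
          exact_mod_cast pv_rowSet_lt friends hpre _ hline _ hf
        rw [hfr m2 hm2] at hmem
        refine Or.inr ⟨(m2 : Int), hf, ?_⟩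
        rwa [hfs m2 hm2]
  have hcount := pv_length_eq_countP _ hnd3
    (fun x : Int => !(x == (k : Int)) &&
      (pvDirect friends[k] x || pvTwoStep friends friends[k] x)) friends.length hchar
  simp only [pvSecondLen, PySem.Set.len, ← hs2]
  rw [hcount]

-- ===== VERDICT (by name: the statement is the Claim_ definition above) =====
theorem highestScores_spec : Claim_equal_highestScores := by
  intro friends _ hpre
  unfold Spec_highestScores highestScores highestScores_alt
  rw [pv_foldl_if_max]
  -- both folds are foldl max over equal score lists
  have hlist :
      (PySem.List.enumerate (friends.map pvRowSet)).map
          (fun p => pvSecondLen (friends.map pvRowSet) p.1 p.2) =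
        (PySem.List.pyRange 0 (friends.length : Int) 1).map
          (fun i =>
            let row := PySem.List.pyGetD friends i ""
            (PySem.List.pyRange 0 (friends.length : Int) 1).foldl
              (fun sc j =>
                if j = i then sc
                else if pvDirect row j || pvTwoStep friends row j then sc + 1 else sc)
              0) := by
    apply List.ext_getElem
    · simp [PySem.List.length_enumerate, PySem.List.length_pyRange_one]
    · intro m h1 h2
      have hm : m < friends.length := by
        simpa [PySem.List.length_enumerate] using h1
      rw [List.getElem_map, List.getElem_map, PySem.List.getElem_enumerate,
        PySem.List.getElem_pyRange_one]
      simp only [zero_add, List.getElem_map]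
      rw [pv_foldl_skip_count, zero_add,
        pv_score_eq friends hpre m hm,
        PySem.List.pyGetD_natCast friends m "", List.getD_eq_getElem _ _ hm,
        PySem.List.pyRange_zero_natCast, List.countP_map]
      rfl
  rw [hlist, List.foldl_map]
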